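-- pv_equiv track=rewrite | github.com/ProveVis/vmdvpy | test/testMatchJson.py | matchJSONStr
-- ===== SOURCE A (Python) =====
-- def matchJSONStr(toBeMatched):
--     if toBeMatched.startswith('{\"type\":'):
--         flag = 0
--         length = len(toBeMatched)
--         for i in range(length):
--             if toBeMatched[i] == '{':
--                 flag += 1
--             elif toBeMatched[i] == '}':
--                 flag -= 1
--             elif toBeMatched[i] == '\n' and flag == 0 and i != 0:
--                 return (toBeMatched[:i], toBeMatched[i+1:])
--         return ('', toBeMatched)
--     elif toBeMatched[0] == '\n':
--         if len(toBeMatched) == 1: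
--             return ('', '')
--         else:
--             return matchJSONStr(toBeMatched[1:])
--     else:
--         return ('', toBeMatched)
-- ===== SOURCE B (Python) =====
-- def matchJSONStr(toBeMatched):
--     s = toBeMatched
--     if not s.startswith('{"type":'):
--         while s and s[0] == '\n':
--             s = s[1:]
--         if not s:
--             return ('', '')
--         if not s.startswith('{"type":'):
--             return ('', s)
--     parts = s.split('\n')
--     bal = 0
--     pos = 0
--     for part in parts[:-1]:
--         bal += part.count('{') - part.count('}')
--         pos += len(part)
--         if bal == 0:
--             return (s[:pos], s[pos + 1:])
--         pos += 1
--     return ('', s)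
-- ===== Notes on version B (the rewrite author's own statement) =====
-- stated objective: alternative
-- what changed: B strips leading newlines with one loop instead of tail recursion and finds the first top-level newline by folding a running brace balance over the newline-separated chunks of the string, instead of A's per-character indexed scan.
-- outside the precondition, e.g. on matchJSONStr(''): A raises IndexError, B returns ('', '')
import Mathlib
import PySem

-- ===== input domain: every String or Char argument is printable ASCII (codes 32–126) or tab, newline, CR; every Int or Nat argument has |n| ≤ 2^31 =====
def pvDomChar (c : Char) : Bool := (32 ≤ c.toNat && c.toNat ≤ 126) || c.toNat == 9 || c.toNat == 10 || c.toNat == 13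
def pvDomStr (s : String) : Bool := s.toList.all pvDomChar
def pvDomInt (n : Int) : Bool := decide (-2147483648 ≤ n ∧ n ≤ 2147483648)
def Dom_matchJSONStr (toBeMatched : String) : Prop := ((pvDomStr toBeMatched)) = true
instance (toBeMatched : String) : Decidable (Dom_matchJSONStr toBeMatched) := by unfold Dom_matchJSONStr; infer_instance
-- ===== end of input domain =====

-- B replaces A's tail recursion over leading newlines by a loop and A's indexed
-- per-character brace scan by a fold over the chunks of s.split('\n') (objective: alternative).

-- ===== PORT A =====
-- the literal '{"type":' as a list of chars
def pvPref : List Char := ['{', '"', 't', 'y', 'p', 'e', '"', ':']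

-- A's for-loop: index i, running flag; some i = the 'return' at the first top-level newline
def scanA : List Char → Int → Nat → Option Nat
  | [], _, _ => none
  | c :: cs, flag, i =>
    if c = '{' then scanA cs (flag + 1) (i + 1)
    else if c = '}' then scanA cs (flag - 1) (i + 1)
    else if c = '\n' ∧ flag = 0 ∧ i ≠ 0 then some i
    else scanA cs flag (i + 1)

def matchJSONStrA : List Char → String × String
  | [] => ("", "")          -- A raises IndexError on ""; excluded by Pre_matchJSONStr
  | c :: cs =>
    if PySem.Chars.startswith (c :: cs) pvPref then
      match scanA (c :: cs) 0 0 with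
      | some i => (String.ofList ((c :: cs).take i), String.ofList ((c :: cs).drop (i + 1)))
      | none => ("", String.ofList (c :: cs))
    else if c = '\n' then
      if cs = [] then ("", "")
      else matchJSONStrA cs
    else ("", String.ofList (c :: cs))

def matchJSONStr (toBeMatched : String) : String × String :=
  matchJSONStrA toBeMatched.toList

-- ===== PORT B =====
-- B's while loop stripping leading newlines
def dropNL : List Char → List Char
  | [] => []
  | c :: cs => if c = '\n' then dropNL cs else c :: cs

-- B's for-loop over parts[:-1]: running balance bal and offset pos
def scanB : List (List Char) → Int → Nat → Option Nat
  | [], _, _ => none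
  | [_], _, _ => none          -- parts[:-1] skips the last chunk
  | p :: q :: rest, bal, pos =>
    let bal' := bal + (p.count '{' : Int) - (p.count '}' : Int)
    let pos' := pos + p.length
    if bal' = 0 then some pos' else scanB (q :: rest) bal' (pos' + 1)

-- the fall-through tail of B: parts = s.split('\n'); fold; else ('', s)
def altScan (s : List Char) : String × String :=
  match scanB (List.splitOn '\n' s) 0 0 with
  | some pos => (String.ofList (s.take pos), String.ofList (s.drop (pos + 1)))
  | none => ("", String.ofList s)

def altGo (cs : List Char) : String × String :=
  if PySem.Chars.startswith cs pvPref then altScan cs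
  else
    let s := dropNL cs
    if s = [] then ("", "")
    else if PySem.Chars.startswith s pvPref then altScan s
    else ("", String.ofList s)

def matchJSONStr_alt (toBeMatched : String) : String × String :=
  altGo toBeMatched.toList

-- ===== PRECONDITION & SPEC =====
-- A raises IndexError on the empty string (toBeMatched[0]); that is the only input excluded.
def Pre_matchJSONStr (toBeMatched : String) : Prop := toBeMatched ≠ ""
instance (toBeMatched : String) : Decidable (Pre_matchJSONStr toBeMatched) := by
  unfold Pre_matchJSONStr; infer_instance

def pvWitness_matchJSONStr : String := "\nhello"

def Spec_matchJSONStr (toBeMatched : String) (out : String × String) : Prop := out = matchJSONStr_alt toBeMatched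
instance (toBeMatched : String) (out : String × String) : Decidable (Spec_matchJSONStr toBeMatched out) := by unfold Spec_matchJSONStr; infer_instance

-- ===== CLAIM (what is proved, stated in full; the proofs are below) =====
def Claim_equal_matchJSONStr : Prop := ∀ (toBeMatched : String), Dom_matchJSONStr toBeMatched → Pre_matchJSONStr toBeMatched → Spec_matchJSONStr toBeMatched (matchJSONStr toBeMatched)

-- ===== LEMMAS AND PROOFS =====

-- consuming one non-newline character of the first chunk
lemma scanB_cons_char (c : Char) (p : List Char) (rest : List (List Char))
    (bal : Int) (pos : Nat) :
    scanB ((c :: p) :: rest) bal pos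
      = scanB (p :: rest) (bal + (if c = '{' then 1 else if c = '}' then (-1 : Int) else 0)) (pos + 1) := by
  cases rest with
  | nil => simp [scanB]
  | cons q rs =>
    simp only [scanB, List.count_cons, List.length_cons]
    have harith :
        bal + ((p.count '{' + if c == '{' then 1 else 0 : Nat) : Int)
            - ((p.count '}' + if c == '}' then 1 else 0 : Nat) : Int)
        = bal + (if c = '{' then 1 else if c = '}' then (-1 : Int) else 0)
            + (p.count '{' : Int) - (p.count '}' : Int) := by
      by_cases h1 : c = '{'
      · by_cases h2 : c = '}'
        · rw [h1] at h2; exact absurd h2 (by decide)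
        · simp only [beq_iff_eq, if_pos h1, if_neg h2]
          push_cast; ring
      · by_cases h2 : c = '}'
        · simp only [beq_iff_eq, if_neg h1, if_pos h2]
          push_cast; ring
        · simp only [beq_iff_eq, if_neg h1, if_neg h2]
          push_cast; ring
    rw [harith]
    have hpos : pos + (p.length + 1) = pos + 1 + p.length := by omega
    rw [hpos]

-- B's chunk fold equals A's character scan (pos = 0 only when the head is not a newline)
lemma scanB_eq_scanA (cs : List Char) :
    ∀ (bal : Int) (pos : Nat), (pos = 0 → cs.head? ≠ some '\n') →
    scanB (List.splitOn '\n' cs) bal pos = scanA cs bal pos := by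
  induction cs with
  | nil => intro bal pos _; simp [List.splitOn, List.splitOnP_nil, scanB, scanA]
  | cons c cs ih =>
    intro bal pos hpos
    by_cases hc : c = '\n'
    · subst hc
      have hpos0 : pos ≠ 0 := by
        intro h; exact (hpos h) (by simp)
      rw [show List.splitOn '\n' ('\n' :: cs) = [] :: List.splitOn '\n' cs by
        simp [List.splitOn, List.splitOnP_cons]]
      obtain ⟨q, rest, hq⟩ : ∃ q rest, List.splitOn '\n' cs = q :: rest := by
        cases h : List.splitOn '\n' cs with
        | nil => exact absurd h (List.splitOnP_ne_nil _ _)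
        | cons q rest => exact ⟨q, rest, rfl⟩
      rw [hq]
      simp only [scanB, List.count_nil, List.length_nil, Nat.cast_zero, add_zero, sub_zero]
      rw [← hq, ih bal (pos + 1) (by omega)]
      simp only [scanA, if_neg (by decide : ¬ ('\n' = '{')), if_neg (by decide : ¬ ('\n' = '}'))]
      by_cases hb : bal = 0
      · simp [hb, hpos0]
      · simp [hb]
    · rw [show List.splitOn '\n' (c :: cs)
          = List.modifyHead (List.cons c) (List.splitOn '\n' cs) by
        simp [List.splitOn, List.splitOnP_cons, hc]]
      obtain ⟨q, rest, hq⟩ : ∃ q rest, List.splitOn '\n' cs = q :: rest := by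
        cases h : List.splitOn '\n' cs with
        | nil => exact absurd h (List.splitOnP_ne_nil _ _)
        | cons q rest => exact ⟨q, rest, rfl⟩
      rw [hq, List.modifyHead_cons, scanB_cons_char c, ← hq,
        ih _ (pos + 1) (by omega)]
      by_cases h1 : c = '{'
      · simp [scanA, h1]
      · by_cases h2 : c = '}'
        · rw [show bal + (if c = '{' then (1 : Int) else if c = '}' then -1 else 0) = bal - 1 by
            rw [if_neg h1, if_pos h2]; ring]
          simp [scanA, h2]
        · rw [show bal + (if c = '{' then (1 : Int) else if c = '}' then -1 else 0) = bal by
            rw [if_neg h1, if_neg h2]; ring]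
          simp [scanA, h1, h2, hc]

-- a string starting with '{"type":' starts with '{'
lemma head_of_startswith (cs : List Char) (h : PySem.Chars.startswith cs pvPref = true) :
    ∃ t, cs = '{' :: t := by
  rw [PySem.Chars.startswith_iff] at h
  obtain ⟨t, ht⟩ := h
  exact ⟨['"', 't', 'y', 'p', 'e', '"', ':'] ++ t, by rw [← ht]; rfl⟩

lemma altScan_eq (cs : List Char) (h : PySem.Chars.startswith cs pvPref = true) :
    altScan cs = (match scanA cs 0 0 with
      | some i => (String.ofList (cs.take i), String.ofList (cs.drop (i + 1)))
      | none => ("", String.ofList cs)) := by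
  obtain ⟨t, rfl⟩ := head_of_startswith cs h
  unfold altScan
  rw [scanB_eq_scanA _ 0 0 (by simp)]

lemma startswith_newline_false (rest : List Char) :
    PySem.Chars.startswith ('\n' :: rest) pvPref = false := by
  rw [← Bool.not_eq_true, PySem.Chars.startswith_iff]
  intro h
  obtain ⟨t, ht⟩ := h
  simp [pvPref] at ht

-- B ignores one leading newline
lemma altGo_newline (rest : List Char) : altGo ('\n' :: rest) = altGo rest := by
  unfold altGo
  rw [startswith_newline_false]
  simp only [Bool.false_eq_true, if_false]
  by_cases h : PySem.Chars.startswith rest pvPref = true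
  · obtain ⟨t, rfl⟩ := head_of_startswith rest h
    simp [dropNL, h]
  · simp only [h, if_false, Bool.false_eq_true]
    have : dropNL ('\n' :: rest) = dropNL rest := by simp [dropNL]
    rw [this]

lemma matchA_eq_altGo (cs : List Char) (hne : cs ≠ []) : matchJSONStrA cs = altGo cs := by
  induction cs with
  | nil => exact absurd rfl hne
  | cons c cs ih =>
    by_cases hs : PySem.Chars.startswith (c :: cs) pvPref = true
    · rw [show altGo (c :: cs) = altScan (c :: cs) by unfold altGo; rw [hs]; simp]
      rw [altScan_eq _ hs]
      simp [matchJSONStrA, hs]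
    · by_cases hc : c = '\n'
      · subst hc
        rw [altGo_newline]
        cases cs with
        | nil => decide
        | cons d ds =>
          rw [show matchJSONStrA ('\n' :: d :: ds) = matchJSONStrA (d :: ds) by
            simp [matchJSONStrA, hs]]
          exact ih (by simp)
      · have hdrop : dropNL (c :: cs) = c :: cs := by simp [dropNL, hc]
        simp [matchJSONStrA, hs, hc, altGo, hdrop]

-- ===== VERDICT (by name: the statement is the Claim_ definition above) =====
theorem matchJSONStr_spec : Claim_equal_matchJSONStr := by
  intro s _ hpre
  unfold Spec_matchJSONStr matchJSONStr matchJSONStr_alt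
  apply matchA_eq_altGo
  intro h
  exact hpre (String.toList_eq_nil_iff.mp h)
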